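-- pv_equiv track=rewrite | github.com/Crossdow/MathPack2024 | homework-02/caesar.py | caesar_breaker_brute_force
-- ===== SOURCE A (Python) =====
-- import typing as tp
--
-- def decrypt_caesar(ciphertext: str, shift: int = 3) -> str:
--     """
--     Decrypts a ciphertext using a Caesar cipher.
--
--     >>> decrypt_caesar("SBWKRQ")
--     'PYTHON'
--     >>> decrypt_caesar("sbwkrq")
--     'python'
--     >>> decrypt_caesar("Sbwkrq3.6")
--     'Python3.6'
--     >>> decrypt_caesar("")
--     ''
--     """
--     return ''.join([
--         chr((ord(char) - ord('a' if char.islower() else 'A') - shift) % 26 + ord('a' if char.islower() else 'A'))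
--         if char.isalpha() else char
--         for char in ciphertext
--     ])
--
-- def caesar_breaker_brute_force(ciphertext: str, dictionary: tp.Set[str]) -> int:
--     """
--     Brute force breaking a Caesar cipher.
--     """
--     best_shift = 0
--     max_matches = 0
--
--     for shift in range(26):
--         matches = sum(word in dictionary for word in decrypt_caesar(ciphertext, shift).split())
--         if matches > max_matches:
--             max_matches = matches
--             best_shift = shift
--
--     return best_shift
-- ===== SOURCE B (Python) =====
-- LOWER = 'abcdefghijklmnopqrstuvwxyz'
-- UPPER = 'ABCDEFGHIJKLMNOPQRSTUVWXYZ'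
--
-- def _shift_back(word, shift):
--     # table-lookup decryption: locate the letter in the alphabet string and
--     # step back by `shift` positions (no ord() arithmetic)
--     out = []
--     for ch in word:
--         i = LOWER.find(ch)
--         if i >= 0:
--             out.append(LOWER[(i - shift) % 26])
--         else:
--             j = UPPER.find(ch)
--             out.append(UPPER[(j - shift) % 26] if j >= 0 else ch)
--     return ''.join(out)
--
-- def caesar_breaker_brute_force(ciphertext, dictionary):
--     # Split once (a Caesar shift never moves whitespace), score every shift
--     # word by word into a counter dict, then pick the best shift in a
--     # separate argmax pass (lowest shift wins ties, 0 when nothing matches).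
--     counts = {}
--     for word in ciphertext.split():
--         for s in range(26):
--             if _shift_back(word, s) in dictionary:
--                 counts[s] = counts.get(s, 0) + 1
--     best = 0
--     for s in range(1, 26):
--         if counts.get(s, 0) > counts.get(best, 0):
--             best = s
--     return best
-- ===== Notes on version B (the rewrite author's own statement) =====
-- stated objective: alternative
-- what changed: B splits the ciphertext once (Caesar never moves whitespace), decrypts each word by table lookup in alphabet strings (find + rotated index) instead of ord() arithmetic, accumulates per-shift scores word-by-word into a counter dict, and picks the winning shift in a separate argmax pass, where A decrypts the whole text 26 times with chr/ord arithmetic and tracks a running (best, max) pair.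
import Mathlib
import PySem

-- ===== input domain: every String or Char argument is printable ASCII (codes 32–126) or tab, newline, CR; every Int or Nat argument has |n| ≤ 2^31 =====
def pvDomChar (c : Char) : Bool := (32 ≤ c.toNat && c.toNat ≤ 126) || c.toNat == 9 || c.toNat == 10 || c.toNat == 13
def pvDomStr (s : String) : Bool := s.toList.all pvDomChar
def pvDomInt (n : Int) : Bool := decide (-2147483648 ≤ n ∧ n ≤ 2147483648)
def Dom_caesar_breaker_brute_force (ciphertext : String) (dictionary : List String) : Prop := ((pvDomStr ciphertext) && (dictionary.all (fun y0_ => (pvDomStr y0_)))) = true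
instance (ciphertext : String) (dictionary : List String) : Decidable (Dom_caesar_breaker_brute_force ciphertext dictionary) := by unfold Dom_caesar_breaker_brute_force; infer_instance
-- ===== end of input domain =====

-- B splits the ciphertext once, decrypts words by table lookup in alphabet lists (find + rotated
-- index) instead of ord arithmetic, scores shifts word-by-word into a counter dict, and picks the
-- winner in a separate argmax pass; an alternative decomposition of the same cost, proved to return
-- A's exact value.


-- ===== PORT A =====
-- per-character body of A's list comprehension in decrypt_caesar
def pvDecChar (shift : Int) (c : Char) : Char :=
  if PySem.Chars.isalpha c then
    Char.ofNat ((PySem.Int.mod ((c.toNat : Int) - (if PySem.Chars.islower c then 97 else 65) - shift) 26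
                  + (if PySem.Chars.islower c then 97 else 65)).toNat)
  else c

def decrypt_caesar (ciphertext : String) (shift : Int) : String :=
  String.ofList (ciphertext.toList.map (pvDecChar shift))

def caesar_breaker_brute_force (ciphertext : String) (dictionary : List String) : Int :=
  let res := (PySem.List.pyRange 0 26).foldl
    (fun (st : Int × Int) shift =>
      let nmatches : Int :=
        ((PySem.Str.split₀ (decrypt_caesar ciphertext shift)).map
          (fun word => if PySem.Set.contains dictionary word then (1 : Int) else 0)).sum
      if st.2 < nmatches then (shift, nmatches) else st)
    (0, 0)
  res.1

-- ===== PORT B =====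
-- the module-level alphabet strings LOWER and UPPER of Source B, as their character lists
def pvLowerList : List Char :=
  ['a','b','c','d','e','f','g','h','i','j','k','l','m','n','o','p','q','r','s','t','u','v','w','x','y','z']
def pvUpperList : List Char :=
  ['A','B','C','D','E','F','G','H','I','J','K','L','M','N','O','P','Q','R','S','T','U','V','W','X','Y','Z']

-- loop body of Source B's _shift_back: locate ch in an alphabet, step back `shift` positions
def pvShiftBackChar (shift : Int) (ch : Char) : Char :=
  if 0 ≤ PySem.Chars.find pvLowerList [ch] then
    PySem.List.pyGetD pvLowerList (PySem.Int.mod (PySem.Chars.find pvLowerList [ch] - shift) 26) 'a'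
  else if 0 ≤ PySem.Chars.find pvUpperList [ch] then
    PySem.List.pyGetD pvUpperList (PySem.Int.mod (PySem.Chars.find pvUpperList [ch] - shift) 26) 'A'
  else ch

def pvShiftBack (word : String) (shift : Int) : String :=
  String.ofList (word.toList.map (pvShiftBackChar shift))

def caesar_breaker_brute_force_alt (ciphertext : String) (dictionary : List String) : Int :=
  let counts : PySem.Dict Int Int := (PySem.Str.split₀ ciphertext).foldl
    (fun d word =>
      (PySem.List.pyRange 0 26).foldl
        (fun d s =>
          if PySem.Set.contains dictionary (pvShiftBack word s)
          then d.insert s (d.getD s 0 + 1) else d) d)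
    PySem.Dict.empty
  (PySem.List.pyRange 1 26).foldl
    (fun best s => if counts.getD best 0 < counts.getD s 0 then s else best) 0

-- ===== PRECONDITION & SPEC =====
def Spec_caesar_breaker_brute_force (ciphertext : String) (dictionary : List String) (out : Int) : Prop := out = caesar_breaker_brute_force_alt ciphertext dictionary
instance (ciphertext : String) (dictionary : List String) (out : Int) : Decidable (Spec_caesar_breaker_brute_force ciphertext dictionary out) := by unfold Spec_caesar_breaker_brute_force; infer_instance

-- ===== CLAIM (what is proved, stated in full; the proofs are below) =====
def Claim_equal_caesar_breaker_brute_force : Prop := ∀ (ciphertext : String) (dictionary : List String), Dom_caesar_breaker_brute_force ciphertext dictionary → Spec_caesar_breaker_brute_force ciphertext dictionary (caesar_breaker_brute_force ciphertext dictionary)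

-- ===== LEMMAS AND PROOFS =====

-- the per-shift score both programs compute
def pvScore (ciphertext : String) (dictionary : List String) (s : Int) : Int :=
  ((PySem.Str.split₀ ciphertext).map
    (fun w => if PySem.Set.contains dictionary (String.ofList (w.toList.map (pvDecChar s))) then (1 : Int) else 0)).sum

lemma pvDecChar_isspace (shift : Int) (c : Char) :
    PySem.Chars.isspace (pvDecChar shift c) = PySem.Chars.isspace c := by
  unfold pvDecChar
  by_cases h : PySem.Chars.isalpha c = true
  · simp only [h, if_true]
    have hc : (65 ≤ c.toNat ∧ c.toNat ≤ 90) ∨ (97 ≤ c.toNat ∧ c.toNat ≤ 122) := by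
      simp only [PySem.Chars.isalpha, PySem.Chars.isupper, PySem.Chars.islower, Bool.or_eq_true,
        Bool.and_eq_true, decide_eq_true_eq, Char.le_def] at h
      rcases h with ⟨h1, h2⟩ | ⟨h1, h2⟩
      · left; exact ⟨h1, h2⟩
      · right; exact ⟨h1, h2⟩
    set b : Int := if PySem.Chars.islower c then 97 else 65 with hb
    have hb' : b = 97 ∨ b = 65 := by rw [hb]; split <;> simp
    have h0 : 0 ≤ PySem.Int.mod ((c.toNat : Int) - b - shift) 26 := PySem.Int.mod_nonneg _ (by norm_num)
    have h1 : PySem.Int.mod ((c.toNat : Int) - b - shift) 26 < 26 := PySem.Int.mod_lt _ (by norm_num)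
    set m : Nat := (PySem.Int.mod ((c.toNat : Int) - b - shift) 26 + b).toNat with hm
    have hm1 : 65 ≤ m ∧ m ≤ 122 := by rw [hm]; omega
    have hv : Nat.isValidChar m := Or.inl (by omega)
    have ht : (Char.ofNat m).toNat = m := by rw [Char.toNat_ofNat, if_pos hv]
    simp only [PySem.Chars.isspace, ht]
    apply Eq.trans (b := false)
    · simp only [Bool.or_eq_false_iff, Bool.and_eq_false_iff, decide_eq_false_iff_not]
      omega
    · symm
      simp only [Bool.or_eq_false_iff, Bool.and_eq_false_iff, decide_eq_false_iff_not]
      omega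
  · simp [h]

lemma split_go_map (f : Char → Char) (hf : ∀ c, PySem.Chars.isspace (f c) = PySem.Chars.isspace c) :
    ∀ (l cur : List Char) (acc : List (List Char)),
    PySem.Chars.split₀.go (l.map f) (cur.map f) (acc.map (List.map f))
      = (PySem.Chars.split₀.go l cur acc).map (List.map f) := by
  intro l
  induction l with
  | nil =>
    intro cur acc
    simp only [List.map_nil, PySem.Chars.split₀.go, List.isEmpty_map]
    by_cases hc : cur.isEmpty
    · simp [hc]
    · simp [hc, List.map_reverse]
  | cons c rest ih =>
    intro cur acc
    simp only [List.map_cons, PySem.Chars.split₀.go, hf c, List.isEmpty_map]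
    by_cases hs : PySem.Chars.isspace c = true
    · simp only [hs, if_true]
      by_cases hc : cur.isEmpty
      · simp only [hc, if_true]
        simpa using ih [] acc
      · simp only [hc]
        have := ih [] (cur.reverse :: acc)
        simpa [List.map_reverse] using this
    · simp only [hs]
      exact ih (c :: cur) acc

lemma split_map (f : Char → Char) (hf : ∀ c, PySem.Chars.isspace (f c) = PySem.Chars.isspace c)
    (l : List Char) :
    PySem.Chars.split₀ (l.map f) = (PySem.Chars.split₀ l).map (List.map f) := by
  unfold PySem.Chars.split₀
  simpa using split_go_map f hf l [] []

lemma matches_eq_score (ciphertext : String) (dictionary : List String) (s : Int) :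
    ((PySem.Str.split₀ (decrypt_caesar ciphertext s)).map
      (fun word => if PySem.Set.contains dictionary word then (1 : Int) else 0)).sum
      = pvScore ciphertext dictionary s := by
  unfold pvScore decrypt_caesar PySem.Str.split₀
  rw [show (String.ofList (ciphertext.toList.map (pvDecChar s))).toList
        = ciphertext.toList.map (pvDecChar s) from by simp]
  rw [split_map _ (pvDecChar_isspace s)]
  simp only [List.map_map]
  congr 1
  apply List.map_congr_left
  intro w _
  simp

lemma score_nonneg (ciphertext : String) (dictionary : List String) (s : Int) :
    0 ≤ pvScore ciphertext dictionary s := by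
  unfold pvScore
  apply List.sum_nonneg
  intro x hx
  rcases List.mem_map.1 hx with ⟨w, _, rfl⟩
  split <;> norm_num


lemma charToNat_inj (a b : Char) (h : a.toNat = b.toNat) : a = b :=
  Char.ext (UInt32.toNat_inj.mp h)

lemma islower_iff (c : Char) : PySem.Chars.islower c = true ↔ 97 ≤ c.toNat ∧ c.toNat ≤ 122 := by
  simp [PySem.Chars.islower, Char.le_def, UInt32.le_iff_toNat_le, Char.toNat_val]

lemma isupper_iff (c : Char) : PySem.Chars.isupper c = true ↔ 65 ≤ c.toNat ∧ c.toNat ≤ 90 := by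
  simp [PySem.Chars.isupper, Char.le_def, UInt32.le_iff_toNat_le, Char.toNat_val]

lemma lower_get : ∀ k, k < 26 → ∀ (h : k < pvLowerList.length), pvLowerList[k].toNat = 97 + k := by
  decide

lemma upper_get : ∀ k, k < 26 → ∀ (h : k < pvUpperList.length), pvUpperList[k].toNat = 65 + k := by
  decide

-- `s.find(ch)` on a 26-letter alphabet list starting at code `base`
lemma alpha_find_in (L : List Char) (base : Nat) (hL : L.length = 26)
    (hg : ∀ k, k < 26 → ∀ (h : k < L.length), L[k].toNat = base + k)
    (c : Char) (h1 : base ≤ c.toNat) (h2 : c.toNat < base + 26) :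
    PySem.Chars.find L [c] = (c.toNat : Int) - base := by
  have hk : c.toNat - base < L.length := by omega
  have hmem : c ∈ L := by
    have hgv := hg (c.toNat - base) (by omega) hk
    have hc : c = L[c.toNat - base] := charToNat_inj _ _ (by omega)
    rw [hc]; exact List.getElem_mem hk
  have hnn : 0 ≤ PySem.Chars.find L [c] :=
    (PySem.Chars.find_nonneg_iff L [c]).mpr ((List.singleton_infix_iff c L).mpr hmem)
  obtain ⟨hpre, -⟩ := PySem.Chars.find_spec (s := L) (sub := [c]) hnn
  have hle : PySem.Chars.find L [c] ≤ L.length := PySem.Chars.find_le_length L [c]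
  have hlt : (PySem.Chars.find L [c]).toNat < L.length := by
    by_contra hge
    have hnil : L.drop (PySem.Chars.find L [c]).toNat = [] := List.drop_eq_nil_of_le (by omega)
    rw [hnil] at hpre
    simp at hpre
  rw [List.drop_eq_getElem_cons hlt] at hpre
  have hc' : c = L[(PySem.Chars.find L [c]).toNat] := (List.cons_prefix_cons.mp hpre).1
  have hgv := hg (PySem.Chars.find L [c]).toNat (by omega) hlt
  have hct : c.toNat = base + (PySem.Chars.find L [c]).toNat := by
    conv_lhs => rw [hc']
    exact hgv
  omega

lemma alpha_find_out (L : List Char) (base : Nat) (hL : L.length = 26)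
    (hg : ∀ k, k < 26 → ∀ (h : k < L.length), L[k].toNat = base + k)
    (c : Char) (h : ¬ (base ≤ c.toNat ∧ c.toNat < base + 26)) :
    PySem.Chars.find L [c] = -1 := by
  apply (PySem.Chars.find_eq_neg_one_iff L [c]).mpr
  intro hinf
  have hmem : c ∈ L := (List.singleton_infix_iff c L).mp hinf
  obtain ⟨k, hk, hck⟩ := List.getElem_of_mem hmem
  have hgv := hg k (by omega) hk
  rw [hck] at hgv
  omega

-- table lookup in the alphabet lists agrees with A's ord arithmetic, character by character
lemma shiftBackChar_eq_decChar (s : Int) (c : Char) : pvShiftBackChar s c = pvDecChar s c := by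
  unfold pvShiftBackChar pvDecChar
  have hlen : ((pvLowerList.length : Nat) : Int) = 26 := by decide
  have hlenU : ((pvUpperList.length : Nat) : Int) = 26 := by decide
  by_cases hlo : 97 ≤ c.toNat ∧ c.toNat < 123
  · rw [alpha_find_in pvLowerList 97 (by decide) lower_get c hlo.1 (by omega)]
    push_cast
    have hlow : PySem.Chars.islower c = true := (islower_iff c).mpr (by omega)
    have halpha : PySem.Chars.isalpha c = true := by
      unfold PySem.Chars.isalpha; rw [hlow]; simp
    rw [if_pos (by omega : (0:Int) ≤ (c.toNat:Int) - 97), if_pos halpha]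
    simp only [hlow, if_true]
    have h0 : 0 ≤ PySem.Int.mod ((c.toNat:Int) - 97 - s) 26 := PySem.Int.mod_nonneg _ (by norm_num)
    have h1 : PySem.Int.mod ((c.toNat:Int) - 97 - s) 26 < 26 := PySem.Int.mod_lt _ (by norm_num)
    rw [PySem.List.pyGetD_eq_getElem pvLowerList 'a' h0 (by omega)]
    apply charToNat_inj
    rw [lower_get _ (by omega), Char.toNat_ofNat, if_pos (Or.inl (by omega))]
    omega
  · by_cases hup : 65 ≤ c.toNat ∧ c.toNat < 91
    · rw [alpha_find_out pvLowerList 97 (by decide) lower_get c (by omega)]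
      rw [if_neg (by norm_num)]
      rw [alpha_find_in pvUpperList 65 (by decide) upper_get c hup.1 (by omega)]
      push_cast
      have hlow : PySem.Chars.islower c = false := by
        by_contra h; rw [Bool.not_eq_false] at h; have := (islower_iff c).mp h; omega
      have halpha : PySem.Chars.isalpha c = true := by
        unfold PySem.Chars.isalpha
        rw [(isupper_iff c).mpr (by omega)]; simp
      rw [if_pos (by omega : (0:Int) ≤ (c.toNat:Int) - 65), if_pos halpha]
      simp only [hlow, if_false, Bool.false_eq_true]
      have h0 : 0 ≤ PySem.Int.mod ((c.toNat:Int) - 65 - s) 26 := PySem.Int.mod_nonneg _ (by norm_num)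
      have h1 : PySem.Int.mod ((c.toNat:Int) - 65 - s) 26 < 26 := PySem.Int.mod_lt _ (by norm_num)
      rw [PySem.List.pyGetD_eq_getElem pvUpperList 'A' h0 (by omega)]
      apply charToNat_inj
      rw [upper_get _ (by omega), Char.toNat_ofNat, if_pos (Or.inl (by omega))]
      omega
    · rw [alpha_find_out pvLowerList 97 (by decide) lower_get c (by omega)]
      rw [alpha_find_out pvUpperList 65 (by decide) upper_get c (by omega)]
      have halpha : PySem.Chars.isalpha c = false := by
        unfold PySem.Chars.isalpha
        have hl : PySem.Chars.islower c = false := by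
          by_contra h; rw [Bool.not_eq_false] at h; have := (islower_iff c).mp h; omega
        have hu : PySem.Chars.isupper c = false := by
          by_contra h; rw [Bool.not_eq_false] at h; have := (isupper_iff c).mp h; omega
        rw [hl, hu]; rfl
      rw [if_neg (by norm_num), if_neg (by norm_num), if_neg (by simp [halpha])]


-- one pass of Source B's inner shift loop touches each key of the range at most once
lemma inner_getD (Q : Int → Bool) :
    ∀ (l : List Int), l.Nodup → ∀ (d : PySem.Dict Int Int) (t : Int),
    (l.foldl (fun d s => if Q s then d.insert s (d.getD s 0 + 1) else d) d).getD t 0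
      = d.getD t 0 + (if t ∈ l ∧ Q t then 1 else 0) := by
  intro l
  induction l with
  | nil => intro _ d t; simp
  | cons a l ih =>
    intro hnd d t
    obtain ⟨ha, hnd'⟩ := List.nodup_cons.mp hnd
    rw [List.foldl_cons, ih hnd']
    by_cases hta : t = a
    · subst hta
      by_cases hq : Q t
      · rw [if_pos hq, PySem.Dict.getD_insert]
        simp [ha, hq]
      · rw [if_neg hq]; simp [ha, hq]
    · have hmem : (t ∈ a :: l ∧ Q t) ↔ (t ∈ l ∧ Q t) := by simp [hta]
      by_cases hq : Q a
      · rw [if_pos hq, PySem.Dict.getD_insert]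
        simp only [hta, if_false, hmem]
      · rw [if_neg hq]; simp only [hmem]

-- the counter dict after the double loop holds the per-shift score at every shift of range(26)
lemma counts_getD (P : String → Int → Bool) :
    ∀ (ws : List String) (d : PySem.Dict Int Int) (t : Int), 0 ≤ t → t < 26 →
    (ws.foldl (fun d w =>
        (PySem.List.pyRange 0 26).foldl
          (fun d s => if P w s then d.insert s (d.getD s 0 + 1) else d) d) d).getD t 0
      = d.getD t 0 + (ws.map (fun w => if P w t then (1 : Int) else 0)).sum := by
  intro ws
  induction ws with
  | nil => intro d t _ _; simp
  | cons w ws ih =>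
    intro d t ht0 ht26
    rw [List.foldl_cons, ih _ t ht0 ht26,
      inner_getD (P w) _ (PySem.List.nodup_pyRange_one 0 26) d t]
    have htmem : t ∈ PySem.List.pyRange 0 26 := (PySem.List.mem_pyRange_one).mpr ⟨ht0, ht26⟩
    simp only [htmem, true_and, List.map_cons, List.sum_cons]
    ring

-- dropping the running-maximum component of A's fold state
lemma a_fold_drop_snd (F : Int → Int) :
    ∀ (l : List Int) (b : Int),
    (l.foldl (fun (st : Int × Int) s => if st.2 < F s then (s, F s) else st) (b, F b)).1
      = l.foldl (fun b s => if F b < F s then s else b) b := by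
  intro l
  induction l with
  | nil => intro b; rfl
  | cons s t ih =>
    intro b
    rw [List.foldl_cons, List.foldl_cons]
    by_cases hlt : F b < F s
    · simpa [hlt] using ih s
    · simpa [hlt] using ih b

-- the argmax fold only looks at the key's values on the visited shifts
lemma best_fold_congr (F G : Int → Int) :
    ∀ (l : List Int), (∀ x ∈ l, F x = G x) → ∀ b, F b = G b →
    l.foldl (fun b s => if F b < F s then s else b) b
      = l.foldl (fun b s => if G b < G s then s else b) b := by
  intro l
  induction l with
  | nil => intro _ b _; rfl
  | cons x t ih =>
    intro hmem b hb
    rw [List.foldl_cons, List.foldl_cons]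
    have hx : F x = G x := hmem x (by simp)
    have htl : ∀ y ∈ t, F y = G y := fun y hy => hmem y (by simp [hy])
    rw [hb, hx]
    by_cases hlt : G b < G x
    · rw [if_pos hlt]; exact ih htl x hx
    · rw [if_neg hlt]; exact ih htl b hb

-- ===== VERDICT (by name: the statement is the Claim_ definition above) =====
theorem caesar_breaker_brute_force_spec : Claim_equal_caesar_breaker_brute_force := by
  intro ciphertext dictionary _
  unfold Spec_caesar_breaker_brute_force caesar_breaker_brute_force caesar_breaker_brute_force_alt
  set F : Int → Int := pvScore ciphertext dictionary with hF
  -- A side: each per-shift match sum is the score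
  simp only [matches_eq_score, ← hF]
  -- B side: the counter dict holds the scores
  have hfun : ∀ t, pvShiftBackChar t = pvDecChar t := fun t => funext (shiftBackChar_eq_decChar t)
  have hcnt : ∀ t : Int, 0 ≤ t → t < 26 →
      ((PySem.Str.split₀ ciphertext).foldl
        (fun d word =>
          (PySem.List.pyRange 0 26).foldl
            (fun d s =>
              if PySem.Set.contains dictionary (pvShiftBack word s)
              then d.insert s (d.getD s 0 + 1) else d) d)
        PySem.Dict.empty).getD t 0 = F t := by
    intro t ht0 ht26
    rw [counts_getD (fun w s => PySem.Set.contains dictionary (pvShiftBack w s))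
      (PySem.Str.split₀ ciphertext) PySem.Dict.empty t ht0 ht26]
    rw [PySem.Dict.getD_empty, zero_add, hF]
    unfold pvScore pvShiftBack
    congr 1
    apply List.map_congr_left
    intro w _
    rw [hfun t]
  have hcons : PySem.List.pyRange 0 26 = (0 : Int) :: PySem.List.pyRange 1 26 :=
    PySem.List.pyRange_one_cons (by norm_num)
  rw [hcons, List.foldl_cons]
  have hF0 : (if ((0 : Int), (0 : Int)).2 < F 0 then ((0 : Int), F 0) else ((0 : Int), (0 : Int)))
      = ((0 : Int), F 0) := by
    by_cases h : (0 : Int) < F 0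
    · simp [h]
    · have hnn := score_nonneg ciphertext dictionary 0
      rw [← hF] at hnn
      have : F 0 = 0 := by omega
      simp [this]
  simp only [hF0]
  rw [a_fold_drop_snd F (PySem.List.pyRange 1 26) 0]
  apply best_fold_congr
  · intro x hx
    obtain ⟨hx1, hx26⟩ := PySem.List.mem_pyRange_one.mp hx
    exact (hcnt x (by omega) hx26).symm
  · exact (hcnt 0 (by norm_num) (by norm_num)).symm
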